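-- pv_equiv track=rewrite | github.com/gridvisi/Python_workspace | Zero 2 Hero Class/array/Nest/6 kyu Maximum Depth of Nested Brackets.py | strings_in_max_depth
-- ===== SOURCE A (Python) =====
-- from collections import defaultdict
-- from collections import defaultdict
--
-- def strings_in_max_depth(s):
--     depth, d, words, l = 0, defaultdict(list),'', [];
--     for i in s:
--         if i.isalpha():words+=i
--         elif i =="(":
--             if words:l.append(words)
--             words=''
--             depth+=1
--         elif i==")":
--             l.append(words)
--             if l:d[depth].append(l.pop())
--             words=''
--             depth-=1
--     return max(d.items(),key=lambda i:i[0])[1] if d else [words] or ['']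
-- ===== SOURCE B (Python) =====
-- def strings_in_max_depth(s):
--     depth = 0
--     seg = ''
--     maxd = None
--     acc = []
--     for c in s:
--         if c.isalpha():
--             seg += c
--         elif c == '(':
--             seg = ''
--             depth += 1
--         elif c == ')':
--             if maxd is None or depth > maxd:
--                 maxd = depth
--                 acc = [seg]
--             elif depth == maxd:
--                 acc.append(seg)
--             seg = ''
--             depth -= 1
--     return acc if maxd is not None else [seg]
-- ===== Notes on version B (the rewrite author's own statement) =====
-- stated objective: simpler
-- what changed: B drops A's per-depth defaultdict, the vestigial stack list l and the final max-over-keys extraction, keeping instead a single running maximum closing depth with an accumulator that resets at a strictly deeper closing bracket and appends on ties.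
import Mathlib
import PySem

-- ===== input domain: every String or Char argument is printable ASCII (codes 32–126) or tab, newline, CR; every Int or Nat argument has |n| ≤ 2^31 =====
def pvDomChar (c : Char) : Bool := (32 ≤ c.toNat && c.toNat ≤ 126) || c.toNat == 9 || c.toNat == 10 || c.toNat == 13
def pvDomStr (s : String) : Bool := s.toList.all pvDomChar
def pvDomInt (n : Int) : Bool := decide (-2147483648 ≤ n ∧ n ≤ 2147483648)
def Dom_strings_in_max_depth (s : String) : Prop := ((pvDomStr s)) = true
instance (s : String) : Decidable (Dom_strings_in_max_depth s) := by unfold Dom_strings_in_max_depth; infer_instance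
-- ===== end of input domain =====

-- B replaces A's per-depth defaultdict (plus the max-key extraction and the vestigial list l)
-- by a single running maximum depth with a reset-or-append accumulator: simpler, one state, no dict.

-- ===== PORT A =====
-- state: (depth, d, words, l)
def pvAstep (st : Int × PySem.Dict Int (List (List Char)) × List Char × List (List Char))
    (c : Char) : Int × PySem.Dict Int (List (List Char)) × List Char × List (List Char) :=
  match st with
  | (depth, d, words, l) =>
    if PySem.Chars.isalpha c then (depth, d, words ++ [c], l)
    else if c = '(' then
      (depth + 1, d, [], if words ≠ [] then l ++ [words] else l)
    else if c = ')' then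
      let l2 := l ++ [words]
      match PySem.List.pop? l2 with
      | some (x, l3) => (depth - 1, d.modify depth [] (· ++ [x]), [], l3)
      | none => (depth - 1, d, [], l2)
    else (depth, d, words, l)

def strings_in_max_depth (s : String) : List String :=
  match s.toList.foldl pvAstep (0, PySem.Dict.empty, [], []) with
  | (_, d, words, _) =>
    if d.items ≠ [] then
      match PySem.List.max? d.items (fun p => p.1) with
      | some it => it.2.map (fun w => String.ofList w)
      | none => []
    else [String.ofList words]

-- ===== PORT B =====
-- state: (depth, seg, maxd, acc)
def pvBstep (st : Int × List Char × Option Int × List (List Char))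
    (c : Char) : Int × List Char × Option Int × List (List Char) :=
  match st with
  | (depth, seg, maxd, acc) =>
    if PySem.Chars.isalpha c then (depth, seg ++ [c], maxd, acc)
    else if c = '(' then (depth + 1, [], maxd, acc)
    else if c = ')' then
      match maxd with
      | none => (depth - 1, [], some depth, [seg])
      | some m =>
        if m < depth then (depth - 1, [], some depth, [seg])
        else if depth = m then (depth - 1, [], some m, acc ++ [seg])
        else (depth - 1, [], some m, acc)
    else (depth, seg, maxd, acc)

def strings_in_max_depth_alt (s : String) : List String :=
  match s.toList.foldl pvBstep (0, [], none, []) with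
  | (_, seg, maxd, acc) =>
    match maxd with
    | some _ => acc.map (fun w => String.ofList w)
    | none => [String.ofList seg]

-- ===== PRECONDITION & SPEC =====
def Spec_strings_in_max_depth (s : String) (out : List String) : Prop := out = strings_in_max_depth_alt s
instance (s : String) (out : List String) : Decidable (Spec_strings_in_max_depth s out) := by unfold Spec_strings_in_max_depth; infer_instance

-- ===== CLAIM (what is proved, stated in full; the proofs are below) =====
def Claim_equal_strings_in_max_depth : Prop := ∀ (s : String), Dom_strings_in_max_depth s → Spec_strings_in_max_depth s (strings_in_max_depth s)

-- ===== LEMMAS AND PROOFS =====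

-- The coupling invariant between A's and B's loop states.
def pvInv (stA : Int × PySem.Dict Int (List (List Char)) × List Char × List (List Char))
    (stB : Int × List Char × Option Int × List (List Char)) : Prop :=
  match stA, stB with
  | (da, d, w, _l), (db, sg, maxd, acc) =>
    da = db ∧ w = sg ∧ d.keys.Nodup ∧
    (match maxd with
     | none => d.items = []
     | some m => m ∈ d.keys ∧ d.getD m [] = acc ∧ ∀ k ∈ d.keys, k ≤ m)

theorem pvInv_step (c : Char)
    (stA : Int × PySem.Dict Int (List (List Char)) × List Char × List (List Char))
    (stB : Int × List Char × Option Int × List (List Char))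
    (h : pvInv stA stB) : pvInv (pvAstep stA c) (pvBstep stB c) := by
  obtain ⟨da, d, w, l⟩ := stA
  obtain ⟨db, sg, maxd, acc⟩ := stB
  obtain ⟨hd, hw, hnd, hrest⟩ := h
  subst hd hw
  by_cases ha : PySem.Chars.isalpha c = true
  · simp only [pvAstep, pvBstep, ha, if_pos]
    exact ⟨rfl, rfl, hnd, hrest⟩
  · by_cases ho : c = '('
    · subst ho
      simp only [pvAstep, pvBstep, (by decide : PySem.Chars.isalpha '(' = false),
        Bool.false_eq_true, if_false]
      exact ⟨rfl, rfl, hnd, hrest⟩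
    · by_cases hc : c = ')'
      · subst hc
        simp only [pvAstep, pvBstep, ha, Bool.false_eq_true, if_false, if_neg ho,
          PySem.List.pop?_last]
        cases maxd with
        | none =>
          -- d.items = [] so the dict is empty: the new key is fresh
          have hitems : d.items = [] := hrest
          have hkeys : d.keys = [] := by simp [PySem.Dict.keys, hitems]
          have hcon : d.contains da = false := by
            rw [PySem.Dict.contains_eq_decide_mem_keys]; simp [hkeys]
          refine ⟨rfl, rfl, ?_, ?_, ?_, ?_⟩
          · rw [PySem.Dict.keys_modify, PySem.Dict.keys_insert_of_not_contains _ _ hcon, hkeys]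
            simp
          · rw [PySem.Dict.keys_modify]
            exact (PySem.Dict.mem_keys_insert _ _ _ _).mpr (Or.inl rfl)
          · rw [PySem.Dict.getD_modify, if_pos rfl, PySem.Dict.getD_of_not_contains _ _ hcon]
            simp
          · intro k hk
            rw [PySem.Dict.keys_modify, PySem.Dict.keys_insert_of_not_contains _ _ hcon,
              hkeys] at hk
            simp at hk; omega
        | some m =>
          obtain ⟨hm, hacc, hbound⟩ := hrest
          by_cases hgt : m < da
          · -- new strictly larger depth: fresh key
            have hcon : d.contains da = false := by
              rw [PySem.Dict.contains_eq_decide_mem_keys]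
              simp only [decide_eq_false_iff_not]
              intro hmem; have := hbound da hmem; omega
            simp only [if_pos hgt]
            refine ⟨rfl, rfl, ?_, ?_, ?_, ?_⟩
            · rw [PySem.Dict.keys_modify, PySem.Dict.keys_insert_of_not_contains _ _ hcon]
              refine List.Nodup.append hnd (List.nodup_singleton _) ?_
              intro x hx hx'; simp at hx'; subst hx'
              have := hbound _ hx; omega
            · rw [PySem.Dict.keys_modify]
              exact (PySem.Dict.mem_keys_insert _ _ _ _).mpr (Or.inl rfl)
            · rw [PySem.Dict.getD_modify, if_pos rfl, PySem.Dict.getD_of_not_contains _ _ hcon]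
              simp
            · intro k hk
              rw [PySem.Dict.keys_modify] at hk
              rcases (PySem.Dict.mem_keys_insert _ _ _ _).mp hk with h1 | h1
              · omega
              · have := hbound _ h1; omega
          · by_cases heq : da = m
            · subst heq
              simp only [if_neg hgt]
              refine ⟨rfl, rfl, ?_, ?_, ?_, ?_⟩
              · rw [PySem.Dict.keys_modify, PySem.Dict.keys_insert_of_contains _ _ (by rw [PySem.Dict.contains_eq_decide_mem_keys]; simpa using hm)]
                exact hnd
              · rw [PySem.Dict.keys_modify]
                exact (PySem.Dict.mem_keys_insert _ _ _ _).mpr (Or.inl rfl)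
              · rw [PySem.Dict.getD_modify, if_pos rfl, hacc]
              · intro k hk
                rw [PySem.Dict.keys_modify] at hk
                rcases (PySem.Dict.mem_keys_insert _ _ _ _).mp hk with h1 | h1
                · omega
                · exact hbound _ h1
            · -- da < m: max unchanged
              simp only [if_neg hgt, if_neg heq]
              refine ⟨rfl, rfl, ?_, ?_, ?_, ?_⟩
              · rw [PySem.Dict.keys_modify]
                by_cases hcon : d.contains da = true
                · rw [PySem.Dict.keys_insert_of_contains _ _ hcon]; exact hnd
                · rw [PySem.Dict.keys_insert_of_not_contains _ _ (by simpa using hcon)]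
                  refine List.Nodup.append hnd (List.nodup_singleton _) ?_
                  intro x hx hx'; simp at hx'; subst hx'
                  rw [PySem.Dict.contains_eq_decide_mem_keys] at hcon
                  simp at hcon; exact hcon hx
              · rw [PySem.Dict.keys_modify]
                exact (PySem.Dict.mem_keys_insert _ _ _ _).mpr (Or.inr hm)
              · rw [PySem.Dict.getD_modify, if_neg (by omega), hacc]
              · intro k hk
                rw [PySem.Dict.keys_modify] at hk
                rcases (PySem.Dict.mem_keys_insert _ _ _ _).mp hk with h1 | h1
                · omega
                · exact hbound _ h1
      · simp only [pvAstep, pvBstep, if_neg ha, if_neg ho, if_neg hc]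
        exact ⟨rfl, rfl, hnd, hrest⟩

theorem pvInv_foldl (cs : List Char)
    (stA : Int × PySem.Dict Int (List (List Char)) × List Char × List (List Char))
    (stB : Int × List Char × Option Int × List (List Char))
    (h : pvInv stA stB) : pvInv (cs.foldl pvAstep stA) (cs.foldl pvBstep stB) := by
  induction cs generalizing stA stB with
  | nil => exact h
  | cons c cs ih => exact ih _ _ (pvInv_step c stA stB h)

-- ===== VERDICT (by name: the statement is the Claim_ definition above) =====
theorem strings_in_max_depth_spec : Claim_equal_strings_in_max_depth := by
  intro s _
  unfold Spec_strings_in_max_depth strings_in_max_depth strings_in_max_depth_alt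
  have h0 : pvInv (0, PySem.Dict.empty, [], []) (0, [], none, []) := by
    refine ⟨rfl, rfl, ?_, ?_⟩ <;> simp [PySem.Dict.keys, PySem.Dict.empty]
  have h := pvInv_foldl s.toList _ _ h0
  set stA := s.toList.foldl pvAstep (0, PySem.Dict.empty, [], []) with hA
  set stB := s.toList.foldl pvBstep (0, [], none, []) with hB
  obtain ⟨da, d, w, l⟩ := stA
  obtain ⟨db, sg, maxd, acc⟩ := stB
  obtain ⟨hd, hw, hnd, hrest⟩ := h
  cases maxd with
  | none =>
    have hitems : d.items = [] := hrest
    simp [hitems, hw]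
  | some m =>
    obtain ⟨hm, hacc, hbound⟩ := hrest
    have hitem : (m, acc) ∈ d.items := by
      rw [PySem.Dict.items_eq_map_keys d hnd []]
      exact List.mem_map.mpr ⟨m, hm, by rw [hacc]⟩
    have hne : d.items ≠ [] := fun hz => by simp [hz] at hitem
    cases hmax : PySem.List.max? d.items (fun p => p.1) with
    | none => exact absurd ((PySem.List.max?_eq_none_iff _ _).mp hmax) hne
    | some it =>
      obtain ⟨k1, v1⟩ := it
      have h1 := PySem.List.max?_mem hmax
      have h2 := PySem.List.max?_isMax hmax _ hitem
      have h3 := hbound k1 (PySem.Dict.mem_keys_of_mem_items _ h1)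
      have hk : k1 = m := by simp at h2; omega
      subst hk
      have hv : v1 = acc := by
        have hgd := PySem.Dict.getD_of_mem_items d h1 hnd []
        rw [hacc] at hgd; exact hgd.symm
      simp [hne, hmax, hv]
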